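-- pv_equiv track=rewrite | github.com/igor-koop/alphafold3_input | src/alphafold3_input/utils.py | base26_encoder
-- ===== SOURCE A (Python) =====
-- def base26_encoder(n: int) -> str:
--     """Encode a positive integer using bijective base-26.
--
--     Converts a 1-based integer into an alphabetic identifier using the
--     bijective base-26 convention.
--
--     Args:
--         n (int): Positive 1-based integer to encode.
--
--     Returns:
--         str: Encoded identifier.
--
--     Raises:
--         ValueError: If ``n`` is less than 1.
--     """
--     if n < 1:
--         msg: str = (
--             "Invalid bijective base-26 index: expected a positive 1-based "
--             f"integer (n={n})."
--         )
--         raise ValueError(msg)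
--
--     out: list[str] = []
--     while n:
--         n, r = divmod(n - 1, 26)
--         out.append(chr(ord("A") + r))
--
--     return "".join(reversed(out))
-- ===== SOURCE B (Python) =====
-- def base26_encoder(n: int) -> str:
--     if n < 1:
--         msg: str = (
--             "Invalid bijective base-26 index: expected a positive 1-based "
--             f"integer (n={n})."
--         )
--         raise ValueError(msg)
--
--     # Phase 1: find the length of the result. Identifiers of length L cover
--     # the range [start, start + block) with block = 26**L.
--     length = 1
--     block = 26
--     start = 1
--     while n >= start + block:
--         start += block
--         block *= 26
--         length += 1
--
--     # Phase 2: n - start is an ordinary base-26 number of exactly `length`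
--     # digits; convert it with fixed width, prepending digits.
--     m = n - start
--     s = ""
--     for _ in range(length):
--         s = chr(ord("A") + m % 26) + s
--         m //= 26
--     return s
-- ===== Notes on version B (the rewrite author's own statement) =====
-- stated objective: alternative
-- what changed: Instead of A's while-loop that peels off least-significant bijective digits via divmod(n-1,26) into a list and reverses it, B first determines the output length by scanning the geometric ranges [start, start+26^L) and then converts the offset n-start as an ordinary fixed-width base-26 number, prepending digits.
import Mathlib
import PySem

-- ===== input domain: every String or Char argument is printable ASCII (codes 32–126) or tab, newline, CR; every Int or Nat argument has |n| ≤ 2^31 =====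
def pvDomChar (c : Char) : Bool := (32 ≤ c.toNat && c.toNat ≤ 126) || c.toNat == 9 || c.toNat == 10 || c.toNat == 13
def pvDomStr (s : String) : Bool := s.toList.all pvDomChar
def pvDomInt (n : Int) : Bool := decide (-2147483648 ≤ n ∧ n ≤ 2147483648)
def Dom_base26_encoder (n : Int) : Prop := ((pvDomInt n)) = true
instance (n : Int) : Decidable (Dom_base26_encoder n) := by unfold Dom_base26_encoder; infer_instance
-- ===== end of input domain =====

-- B replaces A's digit-peeling loop (append least-significant digits, then
-- reverse) by a two-phase algorithm: find the output length by scanning the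
-- geometric ranges, then convert the offset as fixed-width ordinary base-26
-- (objective: alternative; same cost).

-- termination lemmas for the ports (cited by name in decreasing_by)
theorem base26_dec_div (n : Int) (h : ¬ n ≤ 0) :
    (PySem.Int.floordiv (n - 1) 26).toNat < n.toNat := by
  rw [PySem.Int.floordiv_eq_ediv_of_pos (by omega)]
  omega

theorem base26_dec_start (n block start : Int) (h : start + block ≤ n ∧ 0 < block) :
    (n - (start + block)).toNat < (n - start).toNat := by omega

-- ===== PORT A =====
-- the `while n:` loop of A; `n ≤ 0` is the loop exit (within Pre_ the loop
-- variable is always ≥ 0, so this is exactly Python's `while n:`)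
def base26_loopA (n : Int) (out : List Char) : List Char :=
  if _h : n ≤ 0 then out
  else
    base26_loopA (PySem.Int.floordiv (n - 1) 26)
      (out ++ [Char.ofNat (65 + (PySem.Int.mod (n - 1) 26).toNat)])
termination_by n.toNat
decreasing_by exact base26_dec_div n _h

-- `"".join(reversed(out))` = the accumulated chars, reversed, as a string
def base26_encoder (n : Int) : String := String.ofList (base26_loopA n []).reverse

-- ===== PORT B =====
-- B's phase-1 loop `while n >= start + block: …`.  The `0 < block` conjunct
-- is only there to let Lean see termination; in B block is always positive
-- (it starts at 26 and is only multiplied by 26), so the condition is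
-- exactly Python's.
def base26_sizeLoop (n length block start : Int) : Int × Int :=
  if _h : start + block ≤ n ∧ 0 < block then
    base26_sizeLoop n (length + 1) (block * 26) (start + block)
  else (length, start)
termination_by (n - start).toNat
decreasing_by exact base26_dec_start n block start _h

-- B's phase-2 loop `for _ in range(length): s = chr(…) + s; m //= 26`
def base26_buildLoop (k : Nat) (m : Int) (s : String) : String :=
  match k with
  | 0 => s
  | k + 1 =>
      base26_buildLoop k (PySem.Int.floordiv m 26)
        (String.singleton (Char.ofNat (65 + (PySem.Int.mod m 26).toNat)) ++ s)

def base26_encoder_alt (n : Int) : String :=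
  let p := base26_sizeLoop n 1 26 1
  base26_buildLoop p.1.toNat (n - p.2) ""

-- ===== PRECONDITION & SPEC =====
-- A raises ValueError for n < 1; Pre_ excludes exactly those inputs.
def Pre_base26_encoder (n : Int) : Prop := 1 ≤ n
instance (n : Int) : Decidable (Pre_base26_encoder n) := by unfold Pre_base26_encoder; infer_instance
def pvWitness_base26_encoder : Int := (27)

def Spec_base26_encoder (n : Int) (out : String) : Prop := out = base26_encoder_alt n
instance (n : Int) (out : String) : Decidable (Spec_base26_encoder n out) := by unfold Spec_base26_encoder; infer_instance

-- ===== CLAIM (what is proved, stated in full; the proofs are below) =====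
def Claim_equal_base26_encoder : Prop := ∀ (n : Int), Dom_base26_encoder n → Pre_base26_encoder n → Spec_base26_encoder n (base26_encoder n)

-- ===== LEMMAS AND PROOFS =====

-- proof-side recursive characterisation of A's result
def base26_Aref (m : Int) : String :=
  if _h : m ≤ 0 then ""
  else
    base26_Aref (PySem.Int.floordiv (m - 1) 26) ++
      String.singleton (Char.ofNat (65 + (PySem.Int.mod (m - 1) 26).toNat))
termination_by m.toNat
decreasing_by exact base26_dec_div m _h

theorem singleton_ofList (c : Char) : String.singleton c = String.ofList [c] :=
  String.toByteArray_inj.mp rfl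

theorem base26_A_key (k : Nat) : ∀ (n : Int) (acc : List Char), n.toNat ≤ k →
    String.ofList (base26_loopA n acc).reverse = base26_Aref n ++ String.ofList acc.reverse := by
  induction k with
  | zero =>
    intro n acc h
    rw [base26_loopA, base26_Aref]
    have hn : n ≤ 0 := by omega
    simp [hn]
  | succ k ih =>
    intro n acc h
    rw [base26_loopA, base26_Aref]
    by_cases hn : n ≤ 0
    · simp [hn]
    · simp only [hn, dite_false]
      rw [ih _ _ (by
        rw [PySem.Int.floordiv_eq_ediv_of_pos (by omega)]
        omega)]
      simp [singleton_ofList, List.reverse_append, String.append_assoc, ← String.ofList_append]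

theorem base26_sizeLoop_unfold (n length block start : Int) :
    base26_sizeLoop n length block start =
      if start + block ≤ n ∧ 0 < block then
        base26_sizeLoop n (length + 1) (block * 26) (start + block)
      else (length, start) := by
  rw [base26_sizeLoop]
  split <;> simp_all

theorem base26_sizeLoop_len_ge (n length block start : Int) :
    length ≤ (base26_sizeLoop n length block start).1 := by
  unfold base26_sizeLoop
  split
  · have := base26_sizeLoop_len_ge n (length + 1) (block * 26) (start + block)
    omega
  · simp
termination_by (n - start).toNat
decreasing_by omega

-- phase-1 loop commutes with one bijective-digit peel: running it on n from
-- scaled arguments equals running it on q = (n-1)//26 from the plain ones.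
theorem base26_sizeLoop_shift (k : Nat) : ∀ (n length block start : Int),
    ((n - 1) / 26 - start).toNat ≤ k → 0 < block → 0 < start →
    base26_sizeLoop n (length + 1) (block * 26) (start * 26 + 1)
      = ((base26_sizeLoop ((n - 1) / 26) length block start).1 + 1,
         (base26_sizeLoop ((n - 1) / 26) length block start).2 * 26 + 1) := by
  induction k with
  | zero =>
    intro n length block start hk hb hs
    have hcond : ¬ (start + block ≤ (n - 1) / 26 ∧ 0 < block) := by
      intro ⟨h1, _⟩; omega
    have hcond2 : ¬ (start * 26 + 1 + block * 26 ≤ n ∧ 0 < block * 26) := by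
      intro ⟨h1, _⟩; exact hcond ⟨by omega, hb⟩
    rw [base26_sizeLoop_unfold n (length + 1), if_neg hcond2,
        base26_sizeLoop_unfold ((n - 1) / 26) length, if_neg hcond]
  | succ k ih =>
    intro n length block start hk hb hs
    by_cases hc : start + block ≤ (n - 1) / 26 ∧ 0 < block
    · have hc2 : start * 26 + 1 + block * 26 ≤ n ∧ 0 < block * 26 := by
        constructor
        · omega
        · omega
      rw [base26_sizeLoop_unfold n (length + 1), if_pos hc2,
          base26_sizeLoop_unfold ((n - 1) / 26) length, if_pos hc]
      have := ih n (length + 1) (block * 26) (start + block)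
        (by omega) (by omega) (by omega)
      rw [show start * 26 + 1 + block * 26 = (start + block) * 26 + 1 by ring,
          show block * 26 * 26 = block * 26 * 26 by rfl]
      exact this
    · have hc2 : ¬ (start * 26 + 1 + block * 26 ≤ n ∧ 0 < block * 26) := by
        intro ⟨h1, _⟩; exact hc ⟨by omega, hb⟩
      rw [base26_sizeLoop_unfold n (length + 1), if_neg hc2,
          base26_sizeLoop_unfold ((n - 1) / 26) length, if_neg hc]

theorem base26_buildLoop_out (k : Nat) : ∀ (m : Int) (s : String),
    base26_buildLoop k m s = base26_buildLoop k m "" ++ s := by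
  induction k with
  | zero => intro m s; simp [base26_buildLoop]
  | succ k ih =>
    intro m s
    rw [base26_buildLoop, base26_buildLoop, ih]
    conv_rhs => rw [ih]
    simp only [String.append_assoc, String.append_empty]

theorem base26_main (k : Nat) : ∀ (n : Int), n.toNat ≤ k → 1 ≤ n →
    base26_encoder_alt n = base26_Aref n := by
  induction k with
  | zero => intro n hk h1; omega
  | succ k ih =>
    intro n hk h1
    rw [base26_Aref]
    have h0 : ¬ n ≤ 0 := by omega
    simp only [h0, dite_false]
    unfold base26_encoder_alt
    by_cases hsmall : n ≤ 26
    · -- phase 1 stops at once: (1, 1); one build step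
      have hc : ¬ ((1:Int) + 26 ≤ n ∧ (0:Int) < 26) := by omega
      rw [base26_sizeLoop_unfold, if_neg hc]
      have hq : PySem.Int.floordiv (n - 1) 26 = 0 := by
        rw [PySem.Int.floordiv_eq_ediv_of_pos (by norm_num)]
        omega
      rw [hq, base26_Aref]
      rw [dif_pos (le_refl (0:Int))]
      show String.singleton (Char.ofNat (65 + (PySem.Int.mod (n - 1) 26).toNat)) ++ ""
          = "" ++ String.singleton (Char.ofNat (65 + (PySem.Int.mod (n - 1) 26).toNat))
      rw [String.append_empty, String.empty_append]
    · -- n ≥ 27: one phase-1 step, then the shift lemma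
      have hc : (1:Int) + 26 ≤ n ∧ (0:Int) < 26 := by omega
      rw [base26_sizeLoop_unfold, if_pos hc]
      rw [show (1:Int) + 26 = 1 * 26 + 1 by norm_num,
          show (26:Int) * 26 = 26 * 26 by rfl]
      rw [base26_sizeLoop_shift ((n - 1) / 26 - 1).toNat n 1 26 1
            le_rfl (by norm_num) (by norm_num)]
      set p := base26_sizeLoop ((n - 1) / 26) 1 26 1 with hp
      have hlen : 1 ≤ p.1 := base26_sizeLoop_len_ge ((n - 1) / 26) 1 26 1
      have hk1 : (p.1 + 1).toNat = p.1.toNat + 1 := by omega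
      simp only [hk1]
      rw [base26_buildLoop]
      have hdvd : PySem.Int.floordiv (n - (p.2 * 26 + 1)) 26 = (n - 1) / 26 - p.2 := by
        rw [PySem.Int.floordiv_eq_ediv_of_pos (by norm_num)]
        omega
      have hmod : PySem.Int.mod (n - (p.2 * 26 + 1)) 26 = PySem.Int.mod (n - 1) 26 := by
        rw [PySem.Int.mod_eq_emod_of_pos (by norm_num),
            PySem.Int.mod_eq_emod_of_pos (by norm_num)]
        omega
      rw [hdvd, hmod, base26_buildLoop_out, String.append_empty]
      have halt : base26_buildLoop p.1.toNat ((n - 1) / 26 - p.2) ""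
          = base26_encoder_alt ((n - 1) / 26) := by
        unfold base26_encoder_alt
        rw [← hp]
      rw [halt]
      have hqpos : 1 ≤ (n - 1) / 26 := by omega
      have hqlt : ((n - 1) / 26).toNat ≤ k := by omega
      rw [ih _ hqlt hqpos]
      congr 1
      rw [PySem.Int.floordiv_eq_ediv_of_pos (by norm_num)]

-- ===== VERDICT (by name: the statement is the Claim_ definition above) =====
theorem base26_encoder_spec : Claim_equal_base26_encoder := by
  intro n _ hpre
  show base26_encoder n = base26_encoder_alt n
  unfold base26_encoder
  rw [base26_A_key n.toNat n [] le_rfl]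
  rw [base26_main n.toNat n le_rfl hpre]
  simp
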